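-- pv_equiv track=rewrite | github.com/k8godzilla/-Leetcode | 1-100/L085.py | colRead
-- ===== SOURCE A (Python) =====
-- def colRead(matrix, j):
--     groups = []
--     group_sub = []
--     for i in range(len(matrix)):
--         if matrix[i][j] == '1':
--             group_sub.append(i)
--         if matrix[i][j] == '0':
--             if len(group_sub) != 0:
--                 groups.append([group_sub[0], group_sub[-1], j])
--                 group_sub = []
--     if len(group_sub) != 0:
--         groups.append([group_sub[0], group_sub[-1], j])
--     return groups
-- ===== SOURCE B (Python) =====
-- def colRead(matrix, j):
--     # Pass 1: count '0's seen so far; two '1' cells belong to the same group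
--     # iff the same number of '0's precedes them, so tag each '1' with that count.
--     zc = 0
--     keyed = []
--     for i, row in enumerate(matrix):
--         c = row[j]
--         if c == '0':
--             zc += 1
--         elif c == '1':
--             keyed.append((zc, i))
--     # Pass 2: merge consecutive equal keys into [first, last, j] intervals.
--     groups = []
--     prev_key = None
--     for k, i in keyed:
--         if prev_key == k:
--             groups[-1][1] = i
--         else:
--             groups.append([i, i, j])
--             prev_key = k
--     return groups
-- ===== Notes on version B (the rewrite author's own statement) =====
-- stated objective: alternative
-- what changed: Replaces A's accumulate-all-'1'-indices-then-flush-on-'0' single loop by a two-pass algorithm: tag each '1' index with the prefix count of '0's (equal counts = same group), then merge consecutive equal keys into [first,last,j] intervals.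
import Mathlib
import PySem

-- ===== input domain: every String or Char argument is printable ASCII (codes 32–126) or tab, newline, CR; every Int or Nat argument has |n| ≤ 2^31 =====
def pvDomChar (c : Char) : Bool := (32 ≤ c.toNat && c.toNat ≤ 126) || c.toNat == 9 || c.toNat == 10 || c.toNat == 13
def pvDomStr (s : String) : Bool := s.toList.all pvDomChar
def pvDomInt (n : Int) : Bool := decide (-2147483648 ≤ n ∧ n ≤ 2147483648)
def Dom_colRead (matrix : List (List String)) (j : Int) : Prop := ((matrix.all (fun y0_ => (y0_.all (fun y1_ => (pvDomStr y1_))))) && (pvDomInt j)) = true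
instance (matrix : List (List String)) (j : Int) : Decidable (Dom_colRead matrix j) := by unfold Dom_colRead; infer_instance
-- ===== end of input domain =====

-- B is an alternative two-pass algorithm (prefix-'0'-count keys, then merge equal keys);
-- same O(n) cost, proved to return exactly A's value wherever A returns (Pre_ excludes IndexError on row[j]).

-- ===== PORT A =====
-- loop body of A's for-loop: st = (groups, group_sub), i the index, row = matrix[i]
def colReadStepA (j : Int) (st : List (List Int) × List Int) (i : Int) (row : List String) :
    List (List Int) × List Int :=
  let c := PySem.List.pyGetD row j ""
  let gsub := if c == "1" then st.2 ++ [i] else st.2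
  if c == "0" then
    if gsub.length ≠ 0 then
      (st.1 ++ [[PySem.List.pyGetD gsub 0 0, PySem.List.pyGetD gsub (-1) 0, j]], [])
    else (st.1, gsub)
  else (st.1, gsub)

def colRead (matrix : List (List String)) (j : Int) : List (List Int) :=
  let st := (PySem.List.pyRange 0 (matrix.length : Int) 1).foldl
    (fun st i => colReadStepA j st i (PySem.List.pyGetD matrix i [])) ([], [])
  if st.2.length ≠ 0 then
    st.1 ++ [[PySem.List.pyGetD st.2 0 0, PySem.List.pyGetD st.2 (-1) 0, j]]
  else st.1

-- ===== PORT B =====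
-- pass 1 body: st = (zc, keyed)
def colReadStepB1 (j : Int) (st : Int × List (Int × Int)) (p : Int × List String) :
    Int × List (Int × Int) :=
  let c := PySem.List.pyGetD p.2 j ""
  if c == "0" then (st.1 + 1, st.2)
  else if c == "1" then (st.1, st.2 ++ [(st.1, p.1)])
  else st

-- pass 2 body: st = (groups, prev_key); q = (k, i); groups[-1][1] = i via pySetD
def colReadStepB2 (j : Int) (st : List (List Int) × Option Int) (q : Int × Int) :
    List (List Int) × Option Int :=
  if st.2 == some q.1 then
    (PySem.List.pySetD st.1 (-1) (PySem.List.pySetD (PySem.List.pyGetD st.1 (-1) []) 1 q.2), st.2)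
  else (st.1 ++ [[q.2, q.2, j]], some q.1)

def colRead_alt (matrix : List (List String)) (j : Int) : List (List Int) :=
  let keyed := ((PySem.List.enumerate matrix 0).foldl (colReadStepB1 j) (0, [])).2
  (keyed.foldl (colReadStepB2 j) ([], none)).1

-- ===== PRECONDITION & SPEC =====
-- Pre_ excludes exactly the inputs where some row makes row[j] raise IndexError in A (and in B).
def Pre_colRead (matrix : List (List String)) (j : Int) : Prop :=
  ∀ row ∈ matrix, PySem.Raise.InRange row.length j
instance (matrix : List (List String)) (j : Int) : Decidable (Pre_colRead matrix j) := by
  unfold Pre_colRead; infer_instance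
def pvWitness_colRead : List (List String) × Int := ([["1"], ["0"], ["1"]], 0)

def Spec_colRead (matrix : List (List String)) (j : Int) (out : List (List Int)) : Prop := out = colRead_alt matrix j
instance (matrix : List (List String)) (j : Int) (out : List (List Int)) : Decidable (Spec_colRead matrix j out) := by unfold Spec_colRead; infer_instance

-- ===== CLAIM (what is proved, stated in full; the proofs are below) =====
def Claim_equal_colRead : Prop := ∀ (matrix : List (List String)) (j : Int), Dom_colRead matrix j → Pre_colRead matrix j → Spec_colRead matrix j (colRead matrix j)

-- ===== LEMMAS AND PROOFS =====

-- enumerate gives (index, element) with the element equal to indexing into the list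
theorem enum_fact {α : Type} (d : α) :
    ∀ (xs : List α) (s : Int), 0 ≤ s → ∀ p ∈ PySem.List.enumerate xs s,
      s ≤ p.1 ∧ PySem.List.pyGetD xs (p.1 - s) d = p.2 := by
  intro xs
  induction xs with
  | nil => intro s _ p hp; simp [PySem.List.enumerate] at hp
  | cons x xs ih =>
    intro s hs p hp
    rw [PySem.List.enumerate_cons] at hp
    rcases List.mem_cons.mp hp with hp | hp
    · subst hp; simp [PySem.List.pyGetD_zero_cons]
    · obtain ⟨h1, h2⟩ := ih (s + 1) (by omega) p hp
      refine ⟨by omega, ?_⟩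
      obtain ⟨n, hn⟩ : ∃ n : ℕ, p.1 - (s + 1) = (n : Int) :=
        ⟨(p.1 - (s + 1)).toNat, by omega⟩
      have hk : p.1 - s = (n : Int) + 1 := by omega
      rw [hn] at h2
      rw [hk]
      simp only [PySem.List.pyGetD, PySem.List.pyGet?_cons_succ] at h2 ⊢
      exact h2

-- A's range-loop equals a fold over enumerate
theorem foldA_enum (matrix : List (List String)) (j : Int) (init : List (List Int) × List Int) :
    (PySem.List.pyRange 0 (matrix.length : Int) 1).foldl
      (fun st i => colReadStepA j st i (PySem.List.pyGetD matrix i [])) init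
    = (PySem.List.enumerate matrix 0).foldl (fun st p => colReadStepA j st p.1 p.2) init := by
  have h := PySem.List.map_fst_enumerate matrix (0 : Int)
  rw [show ((0 : Int) + matrix.length) = (matrix.length : Int) by ring] at h
  rw [← h, List.foldl_map]
  apply PySem.List.foldl_congr_mem
  intro acc p hp
  obtain ⟨-, h2⟩ := enum_fact [] matrix 0 le_rfl p hp
  rw [show p.1 - 0 = p.1 by ring] at h2
  rw [h2]

-- setting index -1 of a list ending in x replaces x
theorem pySetD_append_neg_one {α : Type} (xs : List α) (x y : α) :
    PySem.List.pySetD (xs ++ [x]) (-1) y = xs ++ [y] := by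
  simp [PySem.List.pySetD, PySem.List.pySet?, PySem.List.pyIdx?]

theorem pyGetD_zero_append (xs ys : List Int) (d : Int) (h : xs ≠ []) :
    PySem.List.pyGetD (xs ++ ys) 0 d = PySem.List.pyGetD xs 0 d := by
  cases xs with
  | nil => exact absurd rfl h
  | cons a t => simp [PySem.List.pyGetD_zero_cons]

def colReadInv (j : Int) (A : List (List Int) × List Int) (B : Int × List (Int × Int)) : Prop :=
  let P := B.2.foldl (colReadStepB2 j) ([], none)
  (A.2 = [] → P.1 = A.1 ∧ ∀ k, P.2 = some k → k < B.1) ∧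
  (A.2 ≠ [] → P.1 = A.1 ++ [[PySem.List.pyGetD A.2 0 0, PySem.List.pyGetD A.2 (-1) 0, j]]
      ∧ P.2 = some B.1)

-- one loop iteration preserves the invariant
theorem colReadInv_one (j : Int) (G : List (List Int)) (S : List Int)
    (zc : Int) (K : List (Int × Int)) (p : Int × List String)
    (h : colReadInv j (G, S) (zc, K)) :
    colReadInv j (colReadStepA j (G, S) p.1 p.2) (colReadStepB1 j (zc, K) p) := by
  obtain ⟨h1, h2⟩ := h
  by_cases hc1 : PySem.List.pyGetD p.2 j "" = "1"
  · have hc0 : ¬ PySem.List.pyGetD p.2 j "" = "0" := by rw [hc1]; decide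
    rw [show colReadStepA j (G, S) p.1 p.2 = (G, S ++ [p.1]) from by
          simp [colReadStepA, hc1],
        show colReadStepB1 j (zc, K) p = (zc, K ++ [(zc, p.1)]) from by
          simp [colReadStepB1, hc1]]
    unfold colReadInv
    refine ⟨fun habs => by simp at habs, fun _ => ?_⟩
    rw [List.foldl_append]
    by_cases hS : S = []
    · obtain ⟨hR, hpk⟩ := h1 hS
      subst hS
      have hne : ((K.foldl (colReadStepB2 j) ([], none)).2 == some zc) = false := by
        cases hpk' : (K.foldl (colReadStepB2 j) ([], none)).2 with
        | none => rfl
        | some k =>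
          have := hpk k hpk'
          simp; omega
      simp [colReadStepB2, hne, hR, PySem.List.pyGetD,
        PySem.List.pyGet?, PySem.List.pyIdx?]
    · obtain ⟨hR, hpk⟩ := h2 hS
      simp only [List.foldl_cons, List.foldl_nil, colReadStepB2, hpk, beq_self_eq_true,
        if_true, hR]
      rw [PySem.List.pyGetD_neg_one_append_singleton]
      have h3 : PySem.List.pySetD [PySem.List.pyGetD S 0 0, PySem.List.pyGetD S (-1) 0, j] 1 p.1
          = [PySem.List.pyGetD S 0 0, p.1, j] := by
        simp [PySem.List.pySetD, PySem.List.pySet?, PySem.List.pyIdx?]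
      rw [h3, pySetD_append_neg_one]
      rw [pyGetD_zero_append S [p.1] 0 hS, PySem.List.pyGetD_neg_one_append_singleton]
      simp
  · by_cases hc0 : PySem.List.pyGetD p.2 j "" = "0"
    · rw [show colReadStepB1 j (zc, K) p = (zc + 1, K) from by simp [colReadStepB1, hc0]]
      by_cases hS : S = []
      · rw [show colReadStepA j (G, S) p.1 p.2 = (G, []) from by
            simp [colReadStepA, hc0, hS]]
        obtain ⟨hR, hpk⟩ := h1 hS
        exact ⟨fun _ => ⟨hR, fun k hk => by have := hpk k hk; omega⟩,
               fun habs => absurd rfl habs⟩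
      · rw [show colReadStepA j (G, S) p.1 p.2
              = (G ++ [[PySem.List.pyGetD S 0 0, PySem.List.pyGetD S (-1) 0, j]], []) from by
            simp [colReadStepA, hc0, List.length_eq_zero_iff, hS]]
        obtain ⟨hR, hpk⟩ := h2 hS
        refine ⟨fun _ => ⟨hR, fun k hk => ?_⟩, fun habs => absurd rfl habs⟩
        rw [hpk] at hk
        simp at hk
        omega
    · rw [show colReadStepA j (G, S) p.1 p.2 = (G, S) from by simp [colReadStepA, hc1, hc0],
          show colReadStepB1 j (zc, K) p = (zc, K) from by simp [colReadStepB1, hc1, hc0]]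
      exact ⟨h1, h2⟩

theorem colReadInv_step (j : Int) :
    ∀ (l : List (Int × List String)) (A : List (List Int) × List Int) (B : Int × List (Int × Int)),
      colReadInv j A B →
      colReadInv j (l.foldl (fun st p => colReadStepA j st p.1 p.2) A) (l.foldl (colReadStepB1 j) B) := by
  intro l
  induction l with
  | nil => intro A B h; exact h
  | cons p l ih =>
    intro A B h
    simp only [List.foldl_cons]
    exact ih _ _ (colReadInv_one j A.1 A.2 B.1 B.2 p h)

theorem colRead_spec' (matrix : List (List String)) (j : Int) :
    colRead matrix j = colRead_alt matrix j := by
  unfold colRead colRead_alt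
  rw [foldA_enum]
  have h0 : colReadInv j ([], []) (0, []) := by
    constructor
    · intro _; exact ⟨rfl, fun k hk => by simp at hk⟩
    · intro habs; exact absurd rfl habs
  have h := colReadInv_step j (PySem.List.enumerate matrix 0) ([], []) (0, []) h0
  obtain ⟨h1, h2⟩ := h
  by_cases hS : ((PySem.List.enumerate matrix 0).foldl
      (fun st p => colReadStepA j st p.1 p.2) ([], [])).2 = []
  · simp only [hS, List.length_nil, ne_eq, not_true_eq_false, if_false]
    exact ((h1 hS).1).symm
  · have hlen : (((PySem.List.enumerate matrix 0).foldl
        (fun st p => colReadStepA j st p.1 p.2) ([], [])).2.length ≠ 0) := by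
      simp [List.length_eq_zero_iff, hS]
    rw [if_pos hlen]
    exact ((h2 hS).1).symm

-- ===== VERDICT (by name: the statement is the Claim_ definition above) =====
theorem colRead_spec : Claim_equal_colRead := by
  intro matrix j _ _
  unfold Spec_colRead
  exact colRead_spec' matrix j
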